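-- pv_equiv track=rewrite | github.com/Grumpified-OGGVCT/HLF-Hieroglyphic-Logic-Framework-MCP | hlf/mcp_tools.py | _estimate_gas
-- ===== SOURCE A (Python) =====
-- def _estimate_gas(source: str) -> int:
--     """Estimate gas for a source without full parsing."""
--     lines = source.strip().split("\n")
--     gas = 0
--
--     for line in lines:
--         stripped = line.strip()
--         if not stripped or stripped.startswith("#"):
--             continue
--
--         # Basic gas estimation
--         gas += stripped.count("(") * 5  # Function calls
--         gas += stripped.count("=") * 1  # Assignments
--         gas += stripped.count("if") * 2  # Branches
--         gas += stripped.count("loop") * 10  # Loops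
--         gas += 1  # Base opcode
--
--     return max(gas, len(lines) * 2)
-- ===== SOURCE B (Python) =====
-- def _estimate_gas(source: str) -> int:
--     t = source.strip()
--     gas = 0
--     newlines = 0
--     started = False   # current line has seen a non-whitespace character
--     comment = False   # current line's first non-whitespace character was '#'
--     i = 0
--     n = len(t)
--     while i < n:
--         c = t[i]
--         if c == "\n":
--             newlines += 1
--             started = False
--             comment = False
--         elif not c.isspace():
--             if not started:
--                 started = True
--                 comment = c == "#"
--                 if not comment:
--                     gas += 1  # base opcode for this line
--             if not comment:
--                 if c == "(":
--                     gas += 5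
--                 elif c == "=":
--                     gas += 1
--                 if t.startswith("if", i):
--                     gas += 2
--                 if t.startswith("loop", i):
--                     gas += 10
--         i += 1
--     return max(gas, (newlines + 1) * 2)
-- ===== Notes on version B (the rewrite author's own statement) =====
-- stated objective: alternative
-- what changed: B replaces A's split-into-lines loop with four substring counts per line by a single character-level state-machine scan over the stripped source that carries (line-started, comment-line) flags, adds token weights at each match position, and counts newlines for the line total.
import Mathlib
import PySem

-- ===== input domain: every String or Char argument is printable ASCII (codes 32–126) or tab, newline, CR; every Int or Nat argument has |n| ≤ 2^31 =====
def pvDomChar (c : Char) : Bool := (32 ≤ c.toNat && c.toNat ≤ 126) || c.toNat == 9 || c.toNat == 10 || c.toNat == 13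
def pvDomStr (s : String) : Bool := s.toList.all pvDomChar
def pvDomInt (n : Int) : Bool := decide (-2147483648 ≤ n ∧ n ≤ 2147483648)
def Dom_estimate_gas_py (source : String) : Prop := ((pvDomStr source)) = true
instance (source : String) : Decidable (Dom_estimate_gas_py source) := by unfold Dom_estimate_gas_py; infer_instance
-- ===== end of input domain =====

-- B replaces A's split-into-lines / per-line token-count loop by a single character-level
-- state-machine scan over the stripped source (objective: alternative).

-- ===== PORT A =====
-- A-side helper: the body of A's for-loop (gas accumulator; 'continue' = return gas unchanged)
def gasLineA (gas : Int) (line : List Char) : Int :=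
  let stripped := PySem.Chars.strip line
  if stripped = [] ∨ PySem.Chars.startswith stripped ['#'] = true then gas
  else gas + (PySem.Chars.count stripped ['('] : Int) * 5
           + (PySem.Chars.count stripped ['='] : Int) * 1
           + (PySem.Chars.count stripped ['i','f'] : Int) * 2
           + (PySem.Chars.count stripped ['l','o','o','p'] : Int) * 10
           + 1

def estimate_gas_py (source : String) : Int :=
  let lines := PySem.Chars.splitOn (PySem.Chars.strip source.toList) ['\n']
  let gas := lines.foldl gasLineA 0
  max gas ((lines.length : Int) * 2)

-- ===== PORT B =====
-- B-side helper: the while-loop of Source B as structural recursion over the remaining characters;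
-- state (started, comment) describes the current line, carries (newlines, gas); returns (gas, newlines).
def goB : List Char → Bool → Bool → Int → Int → Int × Int
  | [], _, _, nl, gas => (gas, nl)
  | c :: rest, started, comment, nl, gas =>
    if c = '\n' then goB rest false false (nl + 1) gas
    else if PySem.Chars.isspace c then goB rest started comment nl gas
    else
      let comment' := if started then comment else decide (c = '#')
      let gas1 := if !started && !decide (c = '#') then gas + 1 else gas
      let gas2 := if comment' then gas1 else gas1
        + (if c = '(' then 5 else if c = '=' then 1 else 0)
        + (if ['i','f'].isPrefixOf (c :: rest) then 2 else 0)
        + (if ['l','o','o','p'].isPrefixOf (c :: rest) then 10 else 0)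
      goB rest true comment' nl gas2

def estimate_gas_py_alt (source : String) : Int :=
  let t := PySem.Chars.strip source.toList
  let r := goB t false false 0 0
  max r.1 ((r.2 + 1) * 2)

-- ===== PRECONDITION & SPEC =====
def Spec_estimate_gas_py (source : String) (out : Int) : Prop := out = estimate_gas_py_alt source
instance (source : String) (out : Int) : Decidable (Spec_estimate_gas_py source out) := by unfold Spec_estimate_gas_py; infer_instance

-- ===== CLAIM (what is proved, stated in full; the proofs are below) =====
def Claim_equal_estimate_gas_py : Prop := ∀ (source : String), Dom_estimate_gas_py source → Spec_estimate_gas_py source (estimate_gas_py source)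

-- ===== LEMMAS AND PROOFS =====

-- ---------- generic prefix fact ----------
-- a pattern that does not contain the character b cannot match across it
theorem prefix_stop (tok : List Char) : ∀ (u : List Char) (b : Char) (s : List Char), b ∉ tok →
    tok.isPrefixOf (u ++ b :: s) = tok.isPrefixOf u := by
  induction tok with
  | nil => intro u b s _; cases u <;> simp [List.isPrefixOf]
  | cons a tk ih =>
    intro u b s hb
    cases u with
    | nil =>
      have hab : (a == b) = false := by
        simp only [beq_eq_false_iff_ne]; intro h; exact hb (h ▸ List.mem_cons_self)
      simp [List.isPrefixOf, hab]
    | cons c u' =>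
      simp only [List.cons_append, List.isPrefixOf]
      rw [ih u' b s (fun h => hb (List.mem_cons_of_mem a h))]

-- ---------- positional counting ----------
def pcount : List Char → List Char → ℕ
  | [], _ => 0
  | c :: r, tok => (if tok.isPrefixOf (c :: r) then 1 else 0) + pcount r tok

def noBorder (tok : List Char) : Prop :=
  ∀ k, k < tok.length → 0 < k → tok.take (tok.length - k) ≠ tok.drop k

-- non-overlapping count = positional count for border-free patterns
theorem pc_drop (tok : List Char) (hnb : noBorder tok) :
    ∀ (m k : ℕ) (rest : List Char), tok.length - k = m → 0 < k → k ≤ tok.length →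
    pcount (tok.drop k ++ rest) tok = pcount rest tok := by
  intro m
  induction m with
  | zero =>
    intro k rest hm _ hk2
    have hk : k = tok.length := by omega
    rw [hk, List.drop_length, List.nil_append]
  | succ n ih =>
    intro k rest hm hk1 _
    have hklt : k < tok.length := by omega
    rw [List.drop_eq_getElem_cons hklt, List.cons_append, pcount]
    have hpre : tok.isPrefixOf (tok[k] :: (List.drop (k+1) tok ++ rest)) = false := by
      rw [← List.cons_append, ← List.drop_eq_getElem_cons hklt]
      by_contra h
      have h' : tok <+: (tok.drop k ++ rest) :=
        List.isPrefixOf_iff_prefix.mp (by revert h; cases tok.isPrefixOf (tok.drop k ++ rest) <;> simp)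
      obtain ⟨z, hz⟩ := h'
      have htake : (tok.drop k ++ rest).take (tok.length - k) = tok.take (tok.length - k) := by
        rw [← hz, List.take_append_of_le_length (by omega)]
      have hleft : (tok.drop k ++ rest).take (tok.length - k) = tok.drop k := by
        rw [List.take_append_of_le_length (by simp)]
        simp
      exact hnb k hklt hk1 (by rw [← htake, hleft])
    rw [hpre]
    simpa using ih (k+1) rest (by omega) (by omega) (by omega)

theorem count_nil (sub : List Char) (hsub : sub ≠ []) : PySem.Chars.count [] sub = 0 := by
  simp [PySem.Chars.count, List.isEmpty_iff, hsub, PySem.Chars.count.go]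

theorem go_fuel (sub : List Char) (hsub : sub ≠ []) :
    ∀ (n : ℕ) (l : List Char), l.length ≤ n →
    ∀ (fuel₁ fuel₂ acc : ℕ), l.length ≤ fuel₁ → l.length ≤ fuel₂ →
    PySem.Chars.count.go sub fuel₁ l acc = PySem.Chars.count.go sub fuel₂ l acc := by
  intro n
  induction n with
  | zero =>
    intro l hl fuel₁ fuel₂ acc h1 h2
    have : l = [] := List.length_eq_zero_iff.mp (Nat.le_zero.mp hl)
    subst this
    cases fuel₁ <;> cases fuel₂ <;> simp [PySem.Chars.count.go]
  | succ n ih =>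
    intro l hl fuel₁ fuel₂ acc h1 h2
    cases l with
    | nil => cases fuel₁ <;> cases fuel₂ <;> simp [PySem.Chars.count.go]
    | cons h t =>
      have hslen : 1 ≤ sub.length := by
        cases sub with
        | nil => exact absurd rfl hsub
        | cons a b => simp
      obtain ⟨f₁, rfl⟩ : ∃ m, fuel₁ = m + 1 := ⟨fuel₁ - 1, by simp at h1; omega⟩
      obtain ⟨f₂, rfl⟩ : ∃ m, fuel₂ = m + 1 := ⟨fuel₂ - 1, by simp at h2; omega⟩
      simp only [PySem.Chars.count.go]
      simp only [List.length_cons] at hl h1 h2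
      by_cases hp : sub.isPrefixOf (h :: t) = true
      · simp only [hp, if_true]
        have hdl : (List.drop sub.length (h :: t)).length ≤ t.length := by
          simp only [List.length_drop, List.length_cons]; omega
        exact ih _ (by omega) f₁ f₂ (acc + 1) (by omega) (by omega)
      · rw [if_neg hp, if_neg hp]
        exact ih t (by omega) f₁ f₂ acc (by omega) (by omega)

theorem go_acc (sub : List Char) : ∀ (fuel : ℕ) (l : List Char) (acc : ℕ),
    PySem.Chars.count.go sub fuel l acc = PySem.Chars.count.go sub fuel l 0 + acc := by
  intro fuel
  induction fuel with
  | zero => intro l acc; simp [PySem.Chars.count.go]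
  | succ n ih =>
    intro l acc
    cases l with
    | nil => simp [PySem.Chars.count.go]
    | cons h t =>
      simp only [PySem.Chars.count.go]
      by_cases hp : sub.isPrefixOf (h :: t) = true
      · simp only [hp, if_true]
        rw [ih _ (acc + 1), ih _ (0 + 1)]
        omega
      · rw [if_neg hp, if_neg hp, ih _ acc]

theorem go_eq_count (sub : List Char) (hsub : sub ≠ []) (l : List Char) (fuel acc : ℕ)
    (hf : l.length ≤ fuel) :
    PySem.Chars.count.go sub fuel l acc = PySem.Chars.count l sub + acc := by
  rw [go_fuel sub hsub l.length l le_rfl fuel l.length acc hf le_rfl, go_acc]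
  have : PySem.Chars.count l sub = PySem.Chars.count.go sub l.length l 0 := by
    simp [PySem.Chars.count, List.isEmpty_iff, hsub]
  rw [this]

theorem count_cons_step (sub : List Char) (hsub : sub ≠ []) (h : Char) (t : List Char) :
    PySem.Chars.count (h :: t) sub =
      if sub.isPrefixOf (h :: t) = true
      then PySem.Chars.count (List.drop sub.length (h :: t)) sub + 1
      else PySem.Chars.count t sub := by
  have hslen : 1 ≤ sub.length := by
    cases sub with
    | nil => exact absurd rfl hsub
    | cons x y => simp
  have h0 : PySem.Chars.count (h :: t) sub = PySem.Chars.count.go sub (t.length + 1) (h :: t) 0 := by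
    simp [PySem.Chars.count, List.isEmpty_iff, hsub]
  rw [h0]
  simp only [PySem.Chars.count.go]
  by_cases hp : sub.isPrefixOf (h :: t) = true
  · rw [if_pos hp, if_pos hp,
      go_eq_count sub hsub _ t.length (0 + 1) (by simp only [List.length_drop, List.length_cons]; omega)]
  · rw [if_neg hp, if_neg hp, go_eq_count sub hsub t t.length 0 le_rfl]
    omega

theorem count_eq_pcount (tok : List Char) (hne : tok ≠ []) (hnb : noBorder tok) :
    ∀ (n : ℕ) (x : List Char), x.length ≤ n → PySem.Chars.count x tok = pcount x tok := by
  have hlen : 1 ≤ tok.length := by cases tok with | nil => exact absurd rfl hne | cons a b => simp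
  intro n
  induction n with
  | zero =>
    intro x hx
    have : x = [] := List.length_eq_zero_iff.mp (Nat.le_zero.mp hx)
    subst this; rw [count_nil tok hne]; rfl
  | succ n ih =>
    intro x hx
    cases x with
    | nil => rw [count_nil tok hne]; rfl
    | cons c t =>
      rw [count_cons_step tok hne c t, pcount]
      by_cases hp : tok.isPrefixOf (c :: t) = true
      · rw [if_pos hp, if_pos hp]
        obtain ⟨z, hz⟩ := List.isPrefixOf_iff_prefix.mp hp
        have hdropl : List.drop tok.length (c :: t) = z := by rw [← hz, List.drop_left]
        have ht : t = tok.drop 1 ++ z := by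
          have := congrArg (List.drop 1) hz
          rw [List.drop_append_of_le_length hlen] at this
          simpa using this.symm
        have hzlen : z.length ≤ n := by
          have := congrArg List.length hz
          simp at this hx
          omega
        rw [hdropl, ih z hzlen, ht, pc_drop tok hnb (tok.length - 1) 1 z rfl (by omega) hlen]
        omega
      · rw [if_neg hp, if_neg hp]
        simp only [List.length_cons] at hx
        rw [ih t (by omega)]
        simp

-- ---------- the four tokens ----------
theorem nb_paren : noBorder ['('] := by intro k h1 h2; simp at h1; omega
theorem nb_eq : noBorder ['='] := by intro k h1 h2; simp at h1; omega
theorem nb_if : noBorder ['i','f'] := by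
  intro k h1 h2
  have : k = 1 := by simp at h1; omega
  subst this; decide
theorem nb_loop : noBorder ['l','o','o','p'] := by
  intro k h1 h2
  have : k = 1 ∨ k = 2 ∨ k = 3 := by simp at h1; omega
  rcases this with rfl | rfl | rfl <;> decide

-- weighted positional token sum
def pTok : List Char → Int
  | [] => 0
  | c :: r =>
      (if c = '(' then 5 else if c = '=' then 1 else 0)
      + (if ['i','f'].isPrefixOf (c :: r) then 2 else 0)
      + (if ['l','o','o','p'].isPrefixOf (c :: r) then 10 else 0)
      + pTok r

theorem pTok_eq_counts : ∀ (x : List Char),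
    pTok x = (pcount x ['('] : Int) * 5 + (pcount x ['='] : Int) * 1
           + (pcount x ['i','f'] : Int) * 2 + (pcount x ['l','o','o','p'] : Int) * 10 := by
  intro x
  induction x with
  | nil => simp [pTok, pcount]
  | cons c r ih =>
    simp only [pTok, pcount, ih]
    have h1 : (['('].isPrefixOf (c :: r)) = (c == '(') := by simp [List.isPrefixOf, Bool.beq_comm]
    have h2 : (['='].isPrefixOf (c :: r)) = (c == '=') := by simp [List.isPrefixOf, Bool.beq_comm]
    rw [h1, h2]
    split_ifs <;> simp_all <;> ring_nf

-- at a whitespace character no token match starts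
theorem pTok_ws_cons (c : Char) (r : List Char) (hws : PySem.Chars.isspace c = true) :
    pTok (c :: r) = pTok r := by
  have hino : c.toNat ≠ 105 ∧ c.toNat ≠ 108 ∧ c.toNat ≠ 40 ∧ c.toNat ≠ 61 := by
    revert hws; simp [PySem.Chars.isspace]; omega
  have hne1 : (c = '(') = False := by
    simp only [eq_iff_iff, iff_false]; intro h; subst h; exact hino.2.2.1 rfl
  have hne2 : (c = '=') = False := by
    simp only [eq_iff_iff, iff_false]; intro h; subst h; exact hino.2.2.2 rfl
  have hne3 : (['i','f'].isPrefixOf (c :: r)) = false := by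
    simp only [List.isPrefixOf, Bool.and_eq_false_iff]
    left; simp only [beq_eq_false_iff_ne]; intro h; exact hino.1 (by rw [← h]; rfl)
  have hne4 : (['l','o','o','p'].isPrefixOf (c :: r)) = false := by
    simp only [List.isPrefixOf, Bool.and_eq_false_iff]
    left; simp only [beq_eq_false_iff_ne]; intro h; exact hino.2.1 (by rw [← h]; rfl)
  simp [pTok, hne1, hne2, hne3, hne4]

theorem pTok_allws (s : List Char) (hs : s.all PySem.Chars.isspace = true) : pTok s = 0 := by
  induction s with
  | nil => rfl
  | cons c r ih =>
    simp only [List.all_cons, Bool.and_eq_true] at hs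
    rw [pTok_ws_cons c r hs.1, ih hs.2]

-- token chars are not whitespace, so a match never crosses into an all-whitespace suffix
theorem pTok_append_ws (s : List Char) (hs : s.all PySem.Chars.isspace = true) :
    ∀ (y : List Char), pTok (y ++ s) = pTok y := by
  intro y
  induction y with
  | nil => simpa using pTok_allws s hs
  | cons c y' ih =>
    cases s with
    | nil => simp
    | cons b s' =>
      simp only [List.all_cons, Bool.and_eq_true] at hs
      have hbw := hs.1
      have hb1 : b ∉ ['i','f'] := by
        intro h; simp only [List.mem_cons, List.not_mem_nil, or_false] at h
        rcases h with h | h <;> subst h <;> revert hbw <;> decide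
      have hb2 : b ∉ ['l','o','o','p'] := by
        intro h; simp only [List.mem_cons, List.not_mem_nil, or_false] at h
        rcases h with h | h | h | h <;> subst h <;> revert hbw <;> decide
      simp only [List.cons_append, pTok] at *
      rw [← List.cons_append, prefix_stop ['i','f'] (c :: y') b s' hb1,
          prefix_stop ['l','o','o','p'] (c :: y') b s' hb2, ih]

-- ---------- strip structure ----------
theorem rstrip_cons (c : Char) (r : List Char) (hc : PySem.Chars.isspace c = false) :
    PySem.Chars.rstrip (c :: r) = c :: PySem.Chars.rstrip r := by
  unfold PySem.Chars.rstrip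
  rw [List.reverse_cons, List.dropWhile_append]
  by_cases h : (List.dropWhile PySem.Chars.isspace r.reverse).isEmpty = true
  · rw [if_pos h]
    simp only [List.isEmpty_iff] at h
    simp [List.dropWhile, hc, h]
  · rw [if_neg h]
    simp

theorem rstrip_decomp (r : List Char) :
    ∃ s, r = PySem.Chars.rstrip r ++ s ∧ s.all PySem.Chars.isspace = true := by
  refine ⟨(r.reverse.takeWhile PySem.Chars.isspace).reverse, ?_, ?_⟩
  · unfold PySem.Chars.rstrip
    rw [← List.reverse_append, List.takeWhile_append_dropWhile, List.reverse_reverse]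
  · rw [List.all_eq_true]
    intro a ha
    rw [List.mem_reverse] at ha
    exact List.mem_takeWhile_imp ha

-- ---------- the scan of one line ----------
-- value the scan adds for the characters of one line, from state (started, comment)
def V : List Char → Bool → Bool → Int
  | [], _, _ => 0
  | c :: r, started, comment =>
    if PySem.Chars.isspace c then V r started comment
    else
      let comment' := if started then comment else decide (c = '#')
      let base : Int := if !started && !decide (c = '#') then 1 else 0
      let tok : Int := if comment' then 0 else
        (if c = '(' then 5 else if c = '=' then 1 else 0)
        + (if ['i','f'].isPrefixOf (c :: r) then 2 else 0)
        + (if ['l','o','o','p'].isPrefixOf (c :: r) then 10 else 0)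
      base + tok + V r true comment'

theorem V_comment (x : List Char) : V x true true = 0 := by
  induction x with
  | nil => rfl
  | cons c r ih =>
    simp only [V]
    by_cases hws : PySem.Chars.isspace c = true
    · rw [if_pos hws]; exact ih
    · rw [if_neg hws]; simp [ih]

theorem V_true_false (x : List Char) : V x true false = pTok x := by
  induction x with
  | nil => rfl
  | cons c r ih =>
    simp only [V]
    by_cases hws : PySem.Chars.isspace c = true
    · rw [if_pos hws, pTok_ws_cons c r hws, ih]
    · rw [if_neg hws]
      simp only [pTok]
      simp [ih]

theorem V_ws_prefix (w : List Char) (hw : w.all PySem.Chars.isspace = true) :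
    ∀ (x : List Char) (s c : Bool), V (w ++ x) s c = V x s c := by
  induction w with
  | nil => intro x s c; rfl
  | cons a w' ih =>
    intro x s c
    simp only [List.all_cons, Bool.and_eq_true] at hw
    simp only [List.cons_append, V, hw.1, if_true]
    exact ih hw.2 x s c

-- V of a whole line equals A's per-line gas
theorem dropWhile_head_false (p : Char → Bool) (l : List Char) (c : Char) (r : List Char)
    (h : l.dropWhile p = c :: r) : p c = false := by
  have hne : l.dropWhile p ≠ [] := by simp [h]
  have h2 := List.head_dropWhile_not p hne
  simpa [h] using h2

theorem startswith_hash_cons (c : Char) (r : List Char) :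
    PySem.Chars.startswith (c :: r) ['#'] = (c == '#') := by
  simp [PySem.Chars.startswith, List.isPrefixOf, Bool.beq_comm]

theorem lineVal_eq (u : List Char) (_hu : '\n' ∉ u) : V u false false = gasLineA 0 u := by
  rcases h : List.dropWhile PySem.Chars.isspace u with _ | ⟨c, r⟩
  · -- all-whitespace line: A skips it, the scan adds nothing
    have hall : u.all PySem.Chars.isspace = true := by
      rw [List.all_eq_true]
      intro a ha
      by_contra hpa
      have := List.dropWhile_eq_nil_iff.mp h a ha
      exact hpa this
    have hV : V u false false = 0 := by
      have := V_ws_prefix u hall [] false false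
      simpa using this
    have hstrip : PySem.Chars.strip u = [] := by
      simp [PySem.Chars.strip, PySem.Chars.lstrip, h, PySem.Chars.rstrip]
    simp [gasLineA, hstrip, hV]
  · have hc : PySem.Chars.isspace c = false := dropWhile_head_false _ u c r h
    have hwall : (u.takeWhile PySem.Chars.isspace).all PySem.Chars.isspace = true := by
      rw [List.all_eq_true]; intro a ha; exact List.mem_takeWhile_imp ha
    have hsplit : u = u.takeWhile PySem.Chars.isspace ++ (c :: r) := by
      rw [← h, List.takeWhile_append_dropWhile]
    have hV1 : V u false false = V (c :: r) false false := by
      conv_lhs => rw [hsplit]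
      exact V_ws_prefix _ hwall _ false false
    have hstrip : PySem.Chars.strip u = PySem.Chars.rstrip (c :: r) := by
      simp [PySem.Chars.strip, PySem.Chars.lstrip, h]
    obtain ⟨sfx, hsfx, hsall⟩ := rstrip_decomp r
    have hrc : PySem.Chars.rstrip (c :: r) = c :: PySem.Chars.rstrip r := rstrip_cons c r hc
    by_cases hhash : c = '#'
    · -- comment line: A skips it, the scan adds nothing
      have hV2 : V (c :: r) false false = 0 := by
        subst hhash
        simp [V, hc, V_comment]
      have hsw : PySem.Chars.startswith (PySem.Chars.strip u) ['#'] = true := by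
        rw [hstrip, hrc, startswith_hash_cons, hhash]
        rfl
      simp [gasLineA, hsw, hV1, hV2]
    · -- code line: the scan's 1 + the weighted positional token sum = A's counts
      have hV2 : V (c :: r) false false = 1 + pTok (c :: r) := by
        simp [V, hc, hhash, V_true_false, pTok]
        ring
      have hptok : pTok (c :: r) = pTok (c :: PySem.Chars.rstrip r) := by
        conv_lhs => rw [hsfx]
        rw [show c :: (PySem.Chars.rstrip r ++ sfx) = (c :: PySem.Chars.rstrip r) ++ sfx from rfl]
        exact pTok_append_ws sfx hsall _
      have hne : PySem.Chars.strip u ≠ [] := by rw [hstrip, hrc]; simp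
      have hsw : PySem.Chars.startswith (PySem.Chars.strip u) ['#'] = false := by
        rw [hstrip, hrc, startswith_hash_cons]
        simp [hhash]
      have hcond : ¬ (PySem.Chars.strip u = [] ∨ PySem.Chars.startswith (PySem.Chars.strip u) ['#'] = true) := by
        simp [hne, hsw]
      rw [hV1, hV2, hptok]
      simp only [gasLineA, hcond, if_false]
      rw [hstrip, hrc]
      set y := c :: PySem.Chars.rstrip r with hy
      rw [count_eq_pcount ['('] (by simp) nb_paren y.length y le_rfl,
          count_eq_pcount ['='] (by simp) nb_eq y.length y le_rfl,
          count_eq_pcount ['i','f'] (by simp) nb_if y.length y le_rfl,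
          count_eq_pcount ['l','o','o','p'] (by simp) nb_loop y.length y le_rfl,
          pTok_eq_counts]
      ring

-- ---------- the scan consumes one line ----------
theorem goB_mid (u : List Char) : '\n' ∉ u →
    ∀ (tail : List Char), (tail = [] ∨ ∃ v, tail = '\n' :: v) →
    ∀ (started comment : Bool) (nl gas : Int),
    ∃ s' c', goB (u ++ tail) started comment nl gas
           = goB tail s' c' nl (gas + V u started comment) := by
  induction u with
  | nil =>
    intro _ tail _ started comment nl gas
    exact ⟨started, comment, by simp [V]⟩
  | cons c u' ih =>
    intro hu tail htail started comment nl gas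
    have hcn : ¬ c = '\n' := fun h => hu (h ▸ List.mem_cons_self)
    have hu' : '\n' ∉ u' := fun h => hu (List.mem_cons_of_mem c h)
    by_cases hws : PySem.Chars.isspace c = true
    · obtain ⟨s', c', h⟩ := ih hu' tail htail started comment nl gas
      refine ⟨s', c', ?_⟩
      rw [List.cons_append, goB, if_neg hcn, if_pos hws, h]
      simp [V, hws]
    · have hp1 : ['i','f'].isPrefixOf (c :: (u' ++ tail)) = ['i','f'].isPrefixOf (c :: u') := by
        rcases htail with rfl | ⟨v, rfl⟩
        · simp
        · rw [show c :: (u' ++ '\n' :: v) = (c :: u') ++ '\n' :: v from rfl]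
          exact prefix_stop _ _ _ _ (by decide)
      have hp2 : ['l','o','o','p'].isPrefixOf (c :: (u' ++ tail)) = ['l','o','o','p'].isPrefixOf (c :: u') := by
        rcases htail with rfl | ⟨v, rfl⟩
        · simp
        · rw [show c :: (u' ++ '\n' :: v) = (c :: u') ++ '\n' :: v from rfl]
          exact prefix_stop _ _ _ _ (by decide)
      set cm' := (if started then comment else decide (c = '#')) with hcm'
      set g1 := (if !started && !decide (c = '#') then gas + 1 else gas) with hg1
      set g2 := (if cm' then g1 else g1
        + (if c = '(' then (5:Int) else if c = '=' then 1 else 0)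
        + (if ['i','f'].isPrefixOf (c :: (u' ++ tail)) then 2 else 0)
        + (if ['l','o','o','p'].isPrefixOf (c :: (u' ++ tail)) then 10 else 0)) with hg2
      obtain ⟨s', c', h⟩ := ih hu' tail htail true cm' nl g2
      refine ⟨s', c', ?_⟩
      have hred : goB ((c :: u') ++ tail) started comment nl gas = goB (u' ++ tail) true cm' nl g2 := by
        rw [List.cons_append, goB, if_neg hcn, if_neg hws]
      rw [hred, h]
      congr 1
      have hVc : V (c :: u') started comment
          = (if !started && !decide (c = '#') then (1:Int) else 0)
            + (if cm' then 0 else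
                (if c = '(' then (5:Int) else if c = '=' then 1 else 0)
                + (if ['i','f'].isPrefixOf (c :: u') then 2 else 0)
                + (if ['l','o','o','p'].isPrefixOf (c :: u') then 10 else 0))
            + V u' true cm' := by
        rw [V, if_neg hws]
      rw [hVc, hg2, hg1, hp1, hp2]
      split_ifs <;> ring

-- ---------- scanning the join of the lines ----------
theorem goB_join (L : List (List Char)) : L ≠ [] → (∀ u ∈ L, '\n' ∉ u) →
    ∀ (nl gas : Int),
    goB (PySem.Chars.join ['\n'] L) false false nl gas
      = (gas + (L.map (fun u => V u false false)).sum, nl + (L.length : Int) - 1) := by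
  induction L with
  | nil => intro h; exact absurd rfl h
  | cons u L' ih =>
    intro _ hfree nl gas
    cases L' with
    | nil =>
      obtain ⟨s', c', h⟩ := goB_mid u (hfree u List.mem_cons_self) [] (Or.inl rfl) false false nl gas
      rw [PySem.Chars.join_singleton, show u = u ++ [] by simp, h]
      simp [goB]
    | cons q r =>
      have hfree' : ∀ w ∈ q :: r, '\n' ∉ w := fun w hw => hfree w (List.mem_cons_of_mem u hw)
      obtain ⟨s', c', h⟩ := goB_mid u (hfree u List.mem_cons_self)
        ('\n' :: PySem.Chars.join ['\n'] (q :: r)) (Or.inr ⟨_, rfl⟩) false false nl gas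
      rw [PySem.Chars.join_cons_cons, show u ++ ['\n'] ++ PySem.Chars.join ['\n'] (q :: r)
            = u ++ ('\n' :: PySem.Chars.join ['\n'] (q :: r)) by simp, h]
      rw [goB, if_pos rfl]
      rw [ih (by simp) hfree' (nl + 1) (gas + V u false false)]
      simp only [List.map_cons, List.sum_cons, List.length_cons, Prod.mk.injEq]
      constructor <;> push_cast <;> ring

-- ---------- splitOn characterization ----------
def splitNL : List Char → List (List Char)
  | [] => [[]]
  | c :: r =>
    if c = '\n' then [] :: splitNL r
    else match splitNL r with
      | [] => [[c]]
      | p :: ps => (c :: p) :: ps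

theorem splitNL_ne_nil (t : List Char) : splitNL t ≠ [] := by
  cases t with
  | nil => simp [splitNL]
  | cons c r =>
    simp only [splitNL]
    split
    · simp
    · split <;> simp_all

theorem splitgo_spec : ∀ (fuel : ℕ) (l : List Char), l.length ≤ fuel →
    ∀ (cur : List Char) (acc : List (List Char)) (p : List Char) (ps : List (List Char)),
    splitNL l = p :: ps →
    PySem.Chars.splitOn.go ['\n'] fuel l cur acc = acc.reverse ++ (cur.reverse ++ p) :: ps := by
  intro fuel
  induction fuel with
  | zero =>
    intro l hl cur acc p ps hsp
    have : l = [] := List.length_eq_zero_iff.mp (Nat.le_zero.mp hl)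
    subst this
    simp only [splitNL] at hsp
    obtain ⟨rfl, rfl⟩ : p = [] ∧ ps = [] := by
      constructor <;> [exact (List.cons.injEq .. ▸ hsp).1.symm; exact (List.cons.injEq .. ▸ hsp).2.symm]
    simp [PySem.Chars.splitOn.go]
  | succ f ih =>
    intro l hl cur acc p ps hsp
    cases l with
    | nil =>
      simp only [splitNL] at hsp
      obtain ⟨rfl, rfl⟩ : p = [] ∧ ps = [] := by
        constructor <;> [exact (List.cons.injEq .. ▸ hsp).1.symm; exact (List.cons.injEq .. ▸ hsp).2.symm]
      simp [PySem.Chars.splitOn.go]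
    | cons c rest =>
      have hpre : (['\n'].isPrefixOf (c :: rest)) = ('\n' == c) := by
        simp [List.isPrefixOf]
      simp only [List.length_cons] at hl
      by_cases hc : c = '\n'
      · subst hc
        obtain ⟨p', ps', hrest⟩ : ∃ p' ps', splitNL rest = p' :: ps' := by
          rcases hsp' : splitNL rest with _ | ⟨a, b⟩
          · exact absurd hsp' (splitNL_ne_nil rest)
          · exact ⟨a, b, rfl⟩
        have : splitNL ('\n' :: rest) = [] :: p' :: ps' := by
          simp [splitNL, hrest]
        rw [this] at hsp
        obtain ⟨rfl, rfl⟩ : p = [] ∧ ps = p' :: ps' := by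
          constructor <;> [exact (List.cons.injEq .. ▸ hsp).1.symm; exact (List.cons.injEq .. ▸ hsp).2.symm]
        rw [PySem.Chars.splitOn.go, if_pos (by simp [hpre])]
        rw [show List.drop ['\n'].length ('\n' :: rest) = rest from rfl]
        rw [ih rest (by omega) [] (cur.reverse :: acc) _ _ hrest]
        simp
      · obtain ⟨p', ps', hrest⟩ : ∃ p' ps', splitNL rest = p' :: ps' := by
          rcases hsp' : splitNL rest with _ | ⟨a, b⟩
          · exact absurd hsp' (splitNL_ne_nil rest)
          · exact ⟨a, b, rfl⟩
        have : splitNL (c :: rest) = (c :: p') :: ps' := by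
          simp [splitNL, hc, hrest]
        rw [this] at hsp
        obtain ⟨rfl, rfl⟩ : p = c :: p' ∧ ps = ps' := by
          constructor <;> [exact (List.cons.injEq .. ▸ hsp).1.symm; exact (List.cons.injEq .. ▸ hsp).2.symm]
        rw [PySem.Chars.splitOn.go, if_neg (by simp [hpre]; exact fun h => hc h.symm)]
        rw [ih rest (by omega) (c :: cur) acc _ _ hrest]
        simp

theorem splitOn_eq_splitNL (t : List Char) : PySem.Chars.splitOn t ['\n'] = splitNL t := by
  obtain ⟨p, ps, hsp⟩ : ∃ p ps, splitNL t = p :: ps := by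
    rcases hsp' : splitNL t with _ | ⟨a, b⟩
    · exact absurd hsp' (splitNL_ne_nil t)
    · exact ⟨a, b, rfl⟩
  rw [PySem.Chars.splitOn, splitgo_spec (t.length + 1) t (by omega) [] [] p ps hsp, hsp]
  simp

theorem join_cons_head (c : Char) (p : List Char) (ps : List (List Char)) :
    PySem.Chars.join ['\n'] ((c :: p) :: ps) = c :: PySem.Chars.join ['\n'] (p :: ps) := by
  cases ps with
  | nil => rw [PySem.Chars.join_singleton, PySem.Chars.join_singleton]
  | cons q r => rw [PySem.Chars.join_cons_cons, PySem.Chars.join_cons_cons]; simp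

theorem join_splitNL (t : List Char) : PySem.Chars.join ['\n'] (splitNL t) = t := by
  induction t with
  | nil => simp [splitNL, PySem.Chars.join_singleton]
  | cons c r ih =>
    obtain ⟨p, ps, hrest⟩ : ∃ p ps, splitNL r = p :: ps := by
      rcases hsp' : splitNL r with _ | ⟨a, b⟩
      · exact absurd hsp' (splitNL_ne_nil r)
      · exact ⟨a, b, rfl⟩
    by_cases hc : c = '\n'
    · subst hc
      rw [show splitNL ('\n' :: r) = [] :: splitNL r by simp [splitNL], hrest,
          PySem.Chars.join_cons_cons]
      rw [hrest] at ih
      simp [ih]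
    · rw [show splitNL (c :: r) = (c :: p) :: ps by simp [splitNL, hc, hrest], join_cons_head]
      rw [hrest] at ih
      rw [ih]

theorem splitNL_nolf (t : List Char) : ∀ u ∈ splitNL t, '\n' ∉ u := by
  induction t with
  | nil => intro u hu; simp [splitNL] at hu; simp [hu]
  | cons c r ih =>
    obtain ⟨p, ps, hrest⟩ : ∃ p ps, splitNL r = p :: ps := by
      rcases hsp' : splitNL r with _ | ⟨a, b⟩
      · exact absurd hsp' (splitNL_ne_nil r)
      · exact ⟨a, b, rfl⟩
    intro u hu
    by_cases hc : c = '\n'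
    · subst hc
      rw [show splitNL ('\n' :: r) = [] :: splitNL r by simp [splitNL]] at hu
      rcases List.mem_cons.mp hu with rfl | hu'
      · simp
      · exact ih u hu'
    · rw [show splitNL (c :: r) = (c :: p) :: ps by simp [splitNL, hc, hrest]] at hu
      rcases List.mem_cons.mp hu with rfl | hu'
      · intro hmem
        rcases List.mem_cons.mp hmem with h | h
        · exact hc h.symm
        · exact ih p (hrest ▸ List.mem_cons_self) h
      · exact ih u (hrest ▸ List.mem_cons_of_mem p hu')

-- ---------- A's fold as a sum ----------
theorem gasLineA_shift (gas : Int) (u : List Char) : gasLineA gas u = gas + gasLineA 0 u := by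
  by_cases h : (PySem.Chars.strip u = [] ∨ PySem.Chars.startswith (PySem.Chars.strip u) ['#'] = true) <;>
    simp only [gasLineA, h, if_true, if_false] <;> ring

theorem foldA_sum (L : List (List Char)) : ∀ (init : Int),
    L.foldl gasLineA init = init + (L.map (gasLineA 0)).sum := by
  induction L with
  | nil => intro init; simp
  | cons u L' ih =>
    intro init
    simp only [List.foldl_cons, List.map_cons, List.sum_cons, ih, gasLineA_shift init u]
    ring

-- ===== VERDICT (by name: the statement is the Claim_ definition above) =====
theorem estimate_gas_py_spec : Claim_equal_estimate_gas_py := by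
  intro source _
  unfold Spec_estimate_gas_py estimate_gas_py estimate_gas_py_alt
  simp only [splitOn_eq_splitNL]
  set t := PySem.Chars.strip source.toList with ht
  have hjoin := join_splitNL t
  have hscan := goB_join (splitNL t) (splitNL_ne_nil t) (splitNL_nolf t) 0 0
  rw [hjoin] at hscan
  rw [hscan, foldA_sum]
  have hmap : (splitNL t).map (fun u => V u false false) = (splitNL t).map (gasLineA 0) := by
    apply List.map_congr_left
    intro u hu
    exact lineVal_eq u (splitNL_nolf t u hu)
  rw [hmap]
  simp only [Int.zero_add]
  congr 1
  ring
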